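-- pv_equiv track=rewrite | github.com/jk-jung/problem-solving | codewars/6kyu/6_#02 - Music Theory - Validate rhythm.py | validate_rhythm
-- ===== SOURCE A (Python) =====
-- def validate_rhythm(m, s):
--     s = s.split('|')
--     def f(x):
--         if any(c not in '1248' for c in x): return False
--         if m[1] not in [1,2,4,8]: return False
--         return m[0] * 8 // m[1] == sum(8 // int(c) for c in x)
--     if all(f(x) for x in s): return 'Valid rhythm'
--     if len(s) > 1 and all(f(x) for x in s[1:-1] + [s[0] + s[-1]]): return 'Valid rhythm with anacrusis'
--     return 'Invalid rhythm'
-- ===== SOURCE B (Python) =====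
-- def validate_rhythm(m, s):
--     # Single left-to-right scan over the raw string (no split): a state machine
--     # finalizes a measure at each '|', tracking first/middle/current measure data.
--     if m[1] not in (1, 2, 4, 8):
--         return 'Invalid rhythm'
--     target = m[0] * 8 // m[1]
--     dur = {'1': 8, '2': 4, '4': 2, '8': 1}
--     bars = 0
--     first_ok, first_sum = True, 0
--     mid_exact = True
--     done_exact = True
--     cur_ok, cur_sum = True, 0
--     for ch in s:
--         if ch == '|':
--             exact = cur_ok and cur_sum == target
--             done_exact = done_exact and exact
--             if bars == 0:
--                 first_ok, first_sum = cur_ok, cur_sum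
--             else:
--                 mid_exact = mid_exact and exact
--             bars += 1
--             cur_ok, cur_sum = True, 0
--         elif ch in dur:
--             cur_sum += dur[ch]
--         else:
--             cur_ok = False
--     if done_exact and cur_ok and cur_sum == target:
--         return 'Valid rhythm'
--     if bars > 0 and mid_exact and first_ok and cur_ok and first_sum + cur_sum == target:
--         return 'Valid rhythm with anacrusis'
--     return 'Invalid rhythm'
-- ===== Notes on version B (the rewrite author's own statement) =====
-- stated objective: alternative
-- what changed: B replaces A's split-into-measures plus three staged all(f(...)) passes (including reparsing the concatenation s[0]+s[-1]) by a single left-to-right character scan: a state machine that finalizes a measure at each '|' and accumulates, in one pass, the full-validity flag, the middle-measures flag and the first/current measure's validity and duration sum, from which all three verdicts are decided.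
import Mathlib
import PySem

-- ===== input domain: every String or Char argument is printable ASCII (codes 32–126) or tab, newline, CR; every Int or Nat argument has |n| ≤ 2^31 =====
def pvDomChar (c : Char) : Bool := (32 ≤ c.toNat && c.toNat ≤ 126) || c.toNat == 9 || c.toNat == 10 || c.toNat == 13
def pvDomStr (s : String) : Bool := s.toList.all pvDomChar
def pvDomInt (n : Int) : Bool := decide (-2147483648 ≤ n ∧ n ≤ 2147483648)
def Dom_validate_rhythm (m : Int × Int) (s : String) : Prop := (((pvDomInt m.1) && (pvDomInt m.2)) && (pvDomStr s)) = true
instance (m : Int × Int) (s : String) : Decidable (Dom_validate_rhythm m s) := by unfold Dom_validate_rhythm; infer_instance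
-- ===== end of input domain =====

-- B replaces A's split-into-measures and staged all(f) passes by a single
-- character-level state machine (one pass, no split); objective: alternative.


-- ===== PORT A =====
-- int(c) for a single character; in A it is evaluated only after the guard
-- establishes c ∈ '1248', where PySem.Int.ofStr? always returns a value (exact there).
def pvIntChar (c : Char) : Int := ((PySem.Int.ofStr? (String.ofList [c])).getD 0)

-- A's inner `f`
def pvF (m : Int × Int) (x : List Char) : Bool :=
  if x.any (fun c => !((['1', '2', '4', '8'] : List Char).contains c)) then false
  else if !(([1, 2, 4, 8] : List Int).contains m.2) then false
  else decide (PySem.Int.floordiv (m.1 * 8) m.2 = (x.map (fun c => PySem.Int.floordiv 8 (pvIntChar c))).sum)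

-- strings handled as lists of code points (PySem.Chars is the exact model of str);
-- s[0] / s[-1] via pyGetD with default [] — exact because split('|') is never empty.
def validate_rhythm (m : Int × Int) (s : String) : String :=
  let sl := PySem.Chars.splitOn s.toList ['|']
  if sl.all (fun x => pvF m x) then "Valid rhythm"
  else if decide (1 < sl.length) &&
      (PySem.List.slice sl (some 1) (some (-1))
        ++ [PySem.List.pyGetD sl 0 [] ++ PySem.List.pyGetD sl (-1) []]).all (fun x => pvF m x) then
    "Valid rhythm with anacrusis"
  else "Invalid rhythm"

-- ===== PORT B =====
-- Source B's `dur` dictionary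
def pvDur : PySem.Dict Char Int :=
  ((((PySem.Dict.empty).insert '1' 8).insert '2' 4).insert '4' 2).insert '8' 1

-- the loop state of Source B's single pass
structure PvSt where
  bars : Int
  firstOk : Bool
  firstSum : Int
  midExact : Bool
  doneExact : Bool
  curOk : Bool
  curSum : Int
deriving Repr, DecidableEq

-- one iteration of Source B's `for ch in s` loop
def pvStep (target : Int) (st : PvSt) (ch : Char) : PvSt :=
  if ch = '|' then
    let ex := st.curOk && decide (st.curSum = target)
    { bars := st.bars + 1,
      firstOk := if st.bars = 0 then st.curOk else st.firstOk,
      firstSum := if st.bars = 0 then st.curSum else st.firstSum,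
      midExact := if st.bars = 0 then st.midExact else st.midExact && ex,
      doneExact := st.doneExact && ex,
      curOk := true, curSum := 0 }
  else if pvDur.contains ch then { st with curSum := st.curSum + pvDur.getD ch 0 }
  else { st with curOk := false }

def validate_rhythm_alt (m : Int × Int) (s : String) : String :=
  if !(([1, 2, 4, 8] : List Int).contains m.2) then "Invalid rhythm"
  else
    let target := PySem.Int.floordiv (m.1 * 8) m.2
    let st := s.toList.foldl (pvStep target) ⟨0, true, 0, true, true, true, 0⟩
    if st.doneExact && st.curOk && decide (st.curSum = target) then "Valid rhythm"
    else if decide (0 < st.bars) && st.midExact && st.firstOk && st.curOk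
        && decide (st.firstSum + st.curSum = target) then "Valid rhythm with anacrusis"
    else "Invalid rhythm"

-- ===== PRECONDITION & SPEC =====
def Spec_validate_rhythm (m : Int × Int) (s : String) (out : String) : Prop := out = validate_rhythm_alt m s
instance (m : Int × Int) (s : String) (out : String) : Decidable (Spec_validate_rhythm m s out) := by unfold Spec_validate_rhythm; infer_instance

-- ===== CLAIM (what is proved, stated in full; the proofs are below) =====
def Claim_equal_validate_rhythm : Prop := ∀ (m : Int × Int) (s : String), Dom_validate_rhythm m s → Spec_validate_rhythm m s (validate_rhythm m s)

-- ===== LEMMAS AND PROOFS =====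

-- a direct recursive model of s.split('|')
def pvSpl : List Char → List (List Char)
  | [] => [[]]
  | c :: r => if c = '|' then [] :: pvSpl r else (pvSpl r).modifyHead (c :: ·)

theorem pvSpl_ne_nil (cs : List Char) : pvSpl cs ≠ [] := by
  induction cs with
  | nil => simp [pvSpl]
  | cons c r ih =>
    simp only [pvSpl]
    split_ifs
    · simp
    · cases h : pvSpl r with
      | nil => exact absurd h ih
      | cons a b => simp [List.modifyHead]

theorem pvSplitOn_go_eq (fuel : Nat) :
    ∀ (l cur : List Char) (acc : List (List Char)), l.length < fuel →
      PySem.Chars.splitOn.go ['|'] fuel l cur acc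
        = acc.reverse ++ (pvSpl l).modifyHead (cur.reverse ++ ·) := by
  induction fuel with
  | zero => intro l cur acc h; omega
  | succ n ih =>
    intro l cur acc h
    cases l with
    | nil => simp [PySem.Chars.splitOn.go, pvSpl]
    | cons c rest =>
      rw [PySem.Chars.splitOn.go]
      by_cases hc : c = '|'
      · subst hc
        rw [if_pos (by simp [List.isPrefixOf])]
        rw [ih _ _ _ (by simpa using Nat.lt_of_succ_lt_succ h)]
        have h2 : pvSpl ('|' :: rest) = [] :: pvSpl rest := by rw [pvSpl, if_pos rfl]
        have h1 : List.drop (['|'] : List Char).length ('|' :: rest) = rest := rfl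
        rw [h1, h2]
        cases hs : pvSpl rest with
        | nil => exact absurd hs (pvSpl_ne_nil rest)
        | cons a b => simp [List.modifyHead]
      · have hnp : (['|'] : List Char).isPrefixOf (c :: rest) = false := by
          simp [List.isPrefixOf, Ne.symm hc]
        rw [if_neg (by simp [hnp])]
        rw [ih _ _ _ (by simpa using Nat.lt_of_succ_lt_succ h)]
        simp only [pvSpl, if_neg hc]
        cases hs : pvSpl rest with
        | nil => exact absurd hs (pvSpl_ne_nil rest)
        | cons a b => simp [List.modifyHead]

theorem pvSplitOn_eq (cs : List Char) : PySem.Chars.splitOn cs ['|'] = pvSpl cs := by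
  unfold PySem.Chars.splitOn
  rw [pvSplitOn_go_eq (cs.length + 1) cs [] [] (by omega)]
  cases h : pvSpl cs <;> simp [List.modifyHead]

-- measure evaluation (proof-side abbreviations)
def pvMOk (x : List Char) : Bool := x.all (fun c => pvDur.contains c)
def pvMSum (x : List Char) : Int := (x.map (fun c => pvDur.getD c 0)).sum
def pvExact (t : Int) (x : List Char) : Bool := pvMOk x && decide (pvMSum x = t)

-- absorbing a whole measure into the current-measure fields
def pvAbsorb (st : PvSt) (x : List Char) : PvSt :=
  { st with curOk := st.curOk && pvMOk x, curSum := st.curSum + pvMSum x }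

-- finishing the fold, measure by measure
def pvFinish (t : Int) (st : PvSt) : List (List Char) → PvSt
  | [] => st
  | [q] => pvAbsorb st q
  | q :: q2 :: qs => pvFinish t (pvStep t (pvAbsorb st q) '|') (q2 :: qs)

theorem pvDur_contains_eq (c : Char) :
    pvDur.contains c = (['1', '2', '4', '8'] : List Char).contains c := by
  unfold pvDur
  rw [PySem.Dict.contains_insert, PySem.Dict.contains_insert, PySem.Dict.contains_insert,
    PySem.Dict.contains_insert, PySem.Dict.contains_empty]
  by_cases h1 : c = '1' <;> by_cases h2 : c = '2' <;> by_cases h4 : c = '4' <;> by_cases h8 : c = '8' <;>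
    simp [h1, h2, h4, h8]

theorem pvDur_getD_not (c : Char) (h : pvDur.contains c = false) : pvDur.getD c 0 = 0 := by
  rw [pvDur_contains_eq] at h
  simp only [List.contains_eq_mem, List.mem_cons, List.not_mem_nil, or_false,
    decide_eq_false_iff_not, not_or] at h
  unfold pvDur
  rw [PySem.Dict.getD_insert, PySem.Dict.getD_insert, PySem.Dict.getD_insert,
    PySem.Dict.getD_insert]
  simp [h.1, h.2.1, h.2.2.1, h.2.2.2, PySem.Dict.getD_empty]

theorem pvDur_getD_char (c : Char) (h : (['1', '2', '4', '8'] : List Char).contains c = true) :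
    pvDur.getD c 0 = PySem.Int.floordiv 8 (pvIntChar c) := by
  simp only [List.contains_eq_mem, List.mem_cons, List.not_mem_nil, or_false, decide_eq_true_eq] at h
  rcases h with h | h | h | h <;> subst h <;> decide

theorem pvAbsorb_cons (t : Int) (st : PvSt) (c : Char) (q : List Char) (hc : c ≠ '|') :
    pvAbsorb st (c :: q) = pvAbsorb (pvStep t st c) q := by
  simp only [pvStep, if_neg hc]
  by_cases h : pvDur.contains c = true
  · simp [pvAbsorb, pvMOk, pvMSum, h, add_assoc]
  · have h' : pvDur.contains c = false := by simpa using h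
    simp [pvAbsorb, pvMOk, pvMSum, h', pvDur_getD_not c h']

theorem pvAbsorb_nil (st : PvSt) : pvAbsorb st [] = st := by
  simp [pvAbsorb, pvMOk, pvMSum]

theorem pvFoldl_eq_finish (t : Int) :
    ∀ (cs : List Char) (st : PvSt), cs.foldl (pvStep t) st = pvFinish t st (pvSpl cs) := by
  intro cs
  induction cs with
  | nil => intro st; simp [pvSpl, pvFinish, pvAbsorb_nil]
  | cons c r ih =>
    intro st
    rw [List.foldl_cons, ih]
    by_cases hc : c = '|'
    · subst hc
      have hspl : pvSpl ('|' :: r) = [] :: pvSpl r := by simp [pvSpl]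
      rw [hspl]
      cases hs : pvSpl r with
      | nil => exact absurd hs (pvSpl_ne_nil r)
      | cons a b => simp only [pvFinish, pvAbsorb_nil]
    · have hspl : pvSpl (c :: r) = (pvSpl r).modifyHead (c :: ·) := by simp [pvSpl, hc]
      rw [hspl]
      cases hs : pvSpl r with
      | nil => exact absurd hs (pvSpl_ne_nil r)
      | cons a b =>
        simp only [List.modifyHead]
        cases b with
        | nil => simp only [pvFinish, pvAbsorb_cons t st c a hc]
        | cons b1 b2 => simp only [pvFinish, pvAbsorb_cons t st c a hc]

-- the exactness of the measure finalized at a bar, from an absorbed state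
theorem pvStep_bar (t : Int) (st : PvSt) :
    pvStep t st '|' = ⟨st.bars + 1,
      if st.bars = 0 then st.curOk else st.firstOk,
      if st.bars = 0 then st.curSum else st.firstSum,
      if st.bars = 0 then st.midExact else st.midExact && (st.curOk && decide (st.curSum = t)),
      st.doneExact && (st.curOk && decide (st.curSum = t)),
      true, 0⟩ := by
  simp [pvStep]

-- closed form of pvFinish from a state past the first bar
theorem pvFinish_pos (t : Int) :
    ∀ (qs : List (List Char)) (h : qs ≠ []) (q : List Char) (st : PvSt), 0 < st.bars →
      pvFinish t st (q :: qs) =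
        ⟨st.bars + qs.length, st.firstOk, st.firstSum,
          st.midExact && ((st.curOk && pvMOk q) && decide (st.curSum + pvMSum q = t))
            && qs.dropLast.all (pvExact t),
          st.doneExact && ((st.curOk && pvMOk q) && decide (st.curSum + pvMSum q = t))
            && qs.dropLast.all (pvExact t),
          pvMOk (qs.getLast h),
          pvMSum (qs.getLast h)⟩ := by
  intro qs
  induction qs with
  | nil => intro h; exact absurd rfl h
  | cons q2 rest ih =>
    intro _ q st hb
    simp only [pvFinish]
    rw [pvStep_bar]
    have hb0 : ¬ (st.bars = 0) := by omega
    simp only [pvAbsorb, if_neg hb0]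
    cases rest with
    | nil =>
      simp only [pvFinish, pvAbsorb]
      simp [List.getLast, Bool.and_assoc]
      exact ⟨rfl, rfl⟩
    | cons r1 r2 =>
      simp only [pvFinish] at *
      rw [ih (by simp) q2 _ (by simp; omega)]
      have hdl : (q2 :: r1 :: r2).dropLast = q2 :: (r1 :: r2).dropLast := by
        simp [List.dropLast]
      have hgl : (q2 :: r1 :: r2).getLast (by simp) = (r1 :: r2).getLast (by simp) := by
        simp [List.getLast]
      simp only [PvSt.mk.injEq, hdl, hgl, List.all_cons, List.length_cons]
      and_intros <;>
        first
          | rfl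
          | (push_cast; omega)
          | ((simp [pvExact, Bool.and_assoc]) <;> rfl)

-- pvF agrees with pvExact under a valid signature
theorem pvF_eq (m : Int × Int) (x : List Char)
    (h : ([1, 2, 4, 8] : List Int).contains m.2 = true) :
    pvF m x = pvExact (PySem.Int.floordiv (m.1 * 8) m.2) x := by
  unfold pvF pvExact pvMOk pvMSum
  by_cases hok : (x.all fun c => pvDur.contains c) = true
  · have hany : (x.any fun c => !(['1', '2', '4', '8'] : List Char).contains c) = false := by
      simp only [List.any_eq_false, Bool.not_eq_true']
      intro c hc
      rw [← pvDur_contains_eq]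
      simp [List.all_eq_true.mp hok c hc]
    have hsum : (x.map (fun c => PySem.Int.floordiv 8 (pvIntChar c))).sum
        = (x.map (fun c => pvDur.getD c 0)).sum := by
      refine congrArg List.sum (List.map_congr_left ?_)
      intro c hc
      rw [pvDur_getD_char c]
      rw [← pvDur_contains_eq]
      exact List.all_eq_true.mp hok c hc
    rw [hany]
    simp only [h, hok, hsum]
    simp [eq_comm]
  · have hany : (x.any fun c => !(['1', '2', '4', '8'] : List Char).contains c) = true := by
      simp only [List.all_eq_true] at hok
      push Not at hok
      obtain ⟨c, hc, hcc⟩ := hok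
      refine List.any_eq_true.mpr ⟨c, hc, ?_⟩
      rw [← pvDur_contains_eq]
      simp [hcc]
    have hok' : (x.all fun c => pvDur.contains c) = false := by simpa using hok
    rw [hany]
    simp [hok']

theorem pvF_of_sig_false (m : Int × Int) (x : List Char)
    (h : ([1, 2, 4, 8] : List Int).contains m.2 = false) : pvF m x = false := by
  simp [pvF]
  intro _ hm
  simp at h
  rcases hm with h' | h' | h' | h' <;> simp [h'] at h

theorem pvMeasure_append (t : Int) (a b : List Char) :
    pvMOk (a ++ b) = (pvMOk a && pvMOk b) ∧ pvMSum (a ++ b) = pvMSum a + pvMSum b := by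
  constructor
  · simp [pvMOk, List.all_append]
  · simp [pvMSum, List.map_append, List.sum_append]

theorem pvSlice_one_negone {α : Type} (xs : List α) :
    PySem.List.slice xs (some 1) (some (-1)) = (xs.drop 1).dropLast := by
  rcases xs with _ | ⟨a, t⟩
  · simp [PySem.List.slice, PySem.List.clampIdx]
  · have h : ¬((t.length : Int) < 0) := by omega
    simp [PySem.List.slice, PySem.List.clampIdx, List.dropLast_eq_take, h]

theorem pvAll_split {α : Type} (p : α → Bool) (l : List α) (h : l ≠ []) :
    l.all p = (l.dropLast.all p && p (l.getLast h)) := by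
  conv_lhs => rw [← List.dropLast_append_getLast h]
  simp [List.all_append]

-- ===== VERDICT (by name: the statement is the Claim_ definition above) =====
theorem validate_rhythm_spec : Claim_equal_validate_rhythm := by
  intro m s _
  simp only [Spec_validate_rhythm, validate_rhythm, validate_rhythm_alt]
  rw [pvSplitOn_eq]
  by_cases hsig : (([1, 2, 4, 8] : List Int).contains m.2) = true
  · rw [hsig]
    simp only [Bool.not_true, Bool.false_eq_true, if_false]
    set t := PySem.Int.floordiv (m.1 * 8) m.2 with ht
    rw [pvFoldl_eq_finish]
    cases hs : pvSpl s.toList with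
    | nil => exact absurd hs (pvSpl_ne_nil _)
    | cons q qs =>
      cases qs with
      | nil =>
        -- one measure: no anacrusis possible on either side
        simp only [pvFinish, pvAbsorb, List.all_cons, List.all_nil, List.length_cons,
          List.length_nil, pvF_eq m _ hsig, pvExact, ← ht]
        have hlen : ¬ ((1 : Int) < ((1 : Nat) : Int)) := by omega
        simp [hlen, pvMOk, pvMSum]
      | cons q2 rest =>
        simp only [pvFinish]
        have hst1 : pvStep t (pvAbsorb ⟨0, true, 0, true, true, true, 0⟩ q) '|'
            = ⟨1, pvMOk q, pvMSum q, true, pvExact t q, true, 0⟩ := by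
          rw [pvStep_bar]
          simp [pvAbsorb, pvExact]
        simp only [hst1]
        -- A-side accessors on q :: q2 :: rest
        have hget0 : PySem.List.pyGetD (q :: q2 :: rest) 0 [] = q :=
          PySem.List.pyGetD_zero_cons _ _ _
        have hgetl : PySem.List.pyGetD (q :: q2 :: rest) (-1) []
            = (q2 :: rest).getLast (by simp) := by
          rw [PySem.List.pyGetD_neg_one _ _ (by simp)]
          rfl
        have hlen : decide (1 < (q :: q2 :: rest).length) = true := by
          simp
        have hslice : PySem.List.slice (q :: q2 :: rest) (some 1) (some (-1))
            = (q2 :: rest).dropLast := by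
          rw [pvSlice_one_negone]; rfl
        rw [hget0, hgetl, hlen, hslice]
        set L := (q2 :: rest).getLast (by simp) with hL
        -- concatenated outer measure
        have hcat : pvF m (q ++ L)
            = ((pvMOk q && pvMOk L) && decide (pvMSum q + pvMSum L = t)) := by
          rw [pvF_eq m _ hsig, ← ht]
          simp [pvExact, (pvMeasure_append t q L).1, (pvMeasure_append t q L).2]
        cases rest with
        | nil =>
          simp only [pvFinish, pvAbsorb]
          have hLq2 : L = q2 := by simp [hL, List.getLast]
          have hcm : pvMOk (q ++ q2) = (pvMOk q && pvMOk q2) := (pvMeasure_append t q q2).1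
          have hcs : pvMSum (q ++ q2) = pvMSum q + pvMSum q2 := (pvMeasure_append t q q2).2
          simp only [List.all_cons, List.all_nil, List.nil_append, List.dropLast,
            pvF_eq m _ hsig, ← ht, hLq2, pvExact, zero_add, hcm, hcs]
          cases h1 : pvMOk q <;> cases h2 : decide (pvMSum q = t) <;>
            cases h3 : pvMOk q2 <;> cases h4 : decide (pvMSum q2 = t) <;>
            cases h5 : decide (pvMSum q + pvMSum q2 = t) <;>
            simp [h1, h2, h3, h4, h5]
        | cons r1 r2 =>
          rw [pvFinish_pos t (r1 :: r2) (by simp) q2 _ (by simp)]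
          have hne : (r1 :: r2) ≠ ([] : List (List Char)) := by simp
          have hgl : (r1 :: r2).getLast hne = L := by simp [hL, List.getLast]
          have hdl : (q2 :: r1 :: r2).dropLast = q2 :: (r1 :: r2).dropLast := by
            simp [List.dropLast]
          have hpos : decide ((0 : Int) < 1 + ((r1 :: r2).length : Int)) = true := by
            simp
            omega
          have hA1 : ((q :: q2 :: r1 :: r2).all fun x => pvF m x)
              = (pvExact t q && (pvExact t q2
                  && ((r1 :: r2).dropLast.all (pvExact t) && pvExact t L))) := by
            rw [List.all_cons, List.all_cons, pvAll_split (fun x => pvF m x) (r1 :: r2) hne, hgl]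
            simp only [pvF_eq m _ hsig, ← ht]
          have hA2 : (((q2 :: r1 :: r2).dropLast ++ [q ++ L]).all fun x => pvF m x)
              = ((pvExact t q2 && (r1 :: r2).dropLast.all (pvExact t)) && pvExact t (q ++ L)) := by
            rw [hdl, List.all_append, List.all_cons, List.all_cons, List.all_nil]
            simp only [pvF_eq m _ hsig, ← ht, Bool.and_true]
          have hcm : pvMOk (q ++ L) = (pvMOk q && pvMOk L) := (pvMeasure_append t q L).1
          have hcs : pvMSum (q ++ L) = pvMSum q + pvMSum L := (pvMeasure_append t q L).2
          simp only [hA1, hA2, hgl, hlen, pvExact, zero_add, hcm, hcs]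
          cases h1 : pvMOk q <;> cases h2 : decide (pvMSum q = t) <;>
            cases h3 : pvMOk q2 <;> cases h4 : decide (pvMSum q2 = t) <;>
            cases h5 : (r1 :: r2).dropLast.all (pvExact t) <;>
            cases h6 : pvMOk L <;> cases h7 : decide (pvMSum L = t) <;>
            cases h8 : decide (pvMSum q + pvMSum L = t) <;>
            (simp [h1, h2, h3, h4, h5, h6, h7, h8]) <;> omega
  · have hsig' : (([1, 2, 4, 8] : List Int).contains m.2) = false := by simpa using hsig
    rw [hsig']
    simp only [Bool.not_false, if_true]
    have hne := pvSpl_ne_nil s.toList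
    cases hs : pvSpl s.toList with
    | nil => exact absurd hs hne
    | cons q qs =>
      have h1 : ((q :: qs).all fun x => pvF m x) = false := by
        simp [List.all_cons, pvF_of_sig_false m _ hsig']
      have h2 : ((PySem.List.slice (q :: qs) (some 1) (some (-1))
          ++ [PySem.List.pyGetD (q :: qs) 0 [] ++ PySem.List.pyGetD (q :: qs) (-1) []]).all
            fun x => pvF m x) = false := by
        rw [List.all_append]
        simp [pvF_of_sig_false m _ hsig']
      rw [h1, h2]
      simp
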